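-- pv_equiv track=rewrite | github.com/feldhausenryan/Cloud-Code | test_segment_base/Checkpoint2_0.py | remove_inbetween
-- ===== SOURCE A (Python) =====
-- def remove_inbetween( in_s, c0, c1):
--     '''
--     while in_s.find(c0)<>-1:
--         in_s = in_s[:in_s.find(c0)]+in_s[in_s.find(c1)+1:]
--     '''
--     goodletter = True
--     new = ""
--     for letter in in_s:
--         if letter == c0:
--             goodletter = False
--         if goodletter:
--             new += letter
--         if letter == c1:
--             goodletter = True
--     return new
-- ===== SOURCE B (Python) =====
-- def remove_inbetween(in_s, c0, c1):
--     out = []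
--     i = 0
--     n = len(in_s)
--     while i < n:
--         if in_s[i] == c0:
--             # skip the whole region: advance to the closing c1 (or the end) and past it
--             j = i
--             while j < n and in_s[j] != c1:
--                 j += 1
--             i = j + 1
--         else:
--             out.append(in_s[i])
--             i += 1
--     return "".join(out)
-- ===== Notes on version B (the rewrite author's own statement) =====
-- stated objective: alternative
-- what changed: Replaces A's boolean good/bad flag carried through one character-by-character fold with an index-cursor scan that, on meeting c0, skips the whole region up to and past the closing c1 in an inner scan, and collects kept characters in a list joined once at the end.
import Mathlib
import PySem

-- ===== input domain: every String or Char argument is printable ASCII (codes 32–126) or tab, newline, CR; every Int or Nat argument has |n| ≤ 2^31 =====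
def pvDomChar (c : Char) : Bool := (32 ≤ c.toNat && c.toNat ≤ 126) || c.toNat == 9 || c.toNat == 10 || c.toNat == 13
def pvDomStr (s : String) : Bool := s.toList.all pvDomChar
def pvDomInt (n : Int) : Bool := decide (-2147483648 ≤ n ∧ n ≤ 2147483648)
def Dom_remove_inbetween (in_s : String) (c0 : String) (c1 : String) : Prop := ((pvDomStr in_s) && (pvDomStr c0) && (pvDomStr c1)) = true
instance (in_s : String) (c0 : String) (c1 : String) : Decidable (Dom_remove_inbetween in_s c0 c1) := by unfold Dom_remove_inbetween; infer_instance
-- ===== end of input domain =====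

-- B replaces A's boolean-flag fold by an index-cursor region skip (alternative decomposition, same cost).

-- ===== PORT A =====
-- A: one fold over the characters carrying (goodletter, new); 'letter == c0' in Python
-- compares the 1-character string to c0, ported as String.mk [letter] = c0.
def remove_inbetween (in_s : String) (c0 : String) (c1 : String) : String :=
  let step := fun (st : Bool × List Char) (letter : Char) =>
    let goodletter := if String.mk [letter] = c0 then false else st.1
    let new := if goodletter then st.2 ++ [letter] else st.2
    let goodletter := if String.mk [letter] = c1 then true else goodletter
    (goodletter, new)
  String.mk (in_s.toList.foldl step (true, [])).2

-- ===== PORT B =====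
-- B's inner 'while j < n and in_s[j] != c1: j += 1' followed by 'i = j + 1':
-- drop through (and past) the first character equal to c1, or everything if none.
def removeInbetweenSkip (cs : List Char) (c1 : String) : List Char :=
  match cs with
  | [] => []
  | c :: rest => if String.mk [c] = c1 then rest else removeInbetweenSkip rest c1

theorem removeInbetweenSkip_length_le (cs : List Char) (c1 : String) :
    (removeInbetweenSkip cs c1).length ≤ cs.length := by
  induction cs with
  | nil => simp [removeInbetweenSkip]
  | cons c rest ih =>
    simp only [removeInbetweenSkip]
    split
    · simp
    · exact Nat.le_succ_of_le ih

-- B's outer cursor loop: on c0 jump past the region, otherwise keep the character.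
def removeInbetweenGo (cs : List Char) (c0 : String) (c1 : String) : List Char :=
  match h : cs with
  | [] => []
  | c :: rest =>
    if String.mk [c] = c0 then
      removeInbetweenGo (removeInbetweenSkip (c :: rest) c1) c0 c1
    else
      c :: removeInbetweenGo rest c0 c1
termination_by cs.length
decreasing_by
  · simp only [removeInbetweenSkip]
    split
    · simp
    · exact Nat.lt_succ_of_le (removeInbetweenSkip_length_le rest c1)
  · simp

def remove_inbetween_alt (in_s : String) (c0 : String) (c1 : String) : String :=
  String.mk (removeInbetweenGo in_s.toList c0 c1)

-- ===== PRECONDITION & SPEC =====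
def Spec_remove_inbetween (in_s : String) (c0 : String) (c1 : String) (out : String) : Prop := out = remove_inbetween_alt in_s c0 c1
instance (in_s : String) (c0 : String) (c1 : String) (out : String) : Decidable (Spec_remove_inbetween in_s c0 c1 out) := by unfold Spec_remove_inbetween; infer_instance

-- ===== CLAIM (what is proved, stated in full; the proofs are below) =====
def Claim_equal_remove_inbetween : Prop := ∀ (in_s : String) (c0 : String) (c1 : String), Dom_remove_inbetween in_s c0 c1 → Spec_remove_inbetween in_s c0 c1 (remove_inbetween in_s c0 c1)

-- ===== LEMMAS AND PROOFS =====

-- Abbreviation for A's fold step (proof-side only).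
def removeInbetweenStep (c0 : String) (c1 : String) : Bool × List Char → Char → Bool × List Char :=
  fun st letter =>
    let goodletter := if String.mk [letter] = c0 then false else st.1
    let new := if goodletter then st.2 ++ [letter] else st.2
    let goodletter := if String.mk [letter] = c1 then true else goodletter
    (goodletter, new)

-- In the bad state A just scans for the closing c1: folding from (false, acc)
-- equals folding from (true, acc) over the suffix past the first c1.
theorem fold_false_eq_skip (c0 c1 : String) (l : List Char) (acc : List Char) :
    (l.foldl (removeInbetweenStep c0 c1) (false, acc)).2
      = ((removeInbetweenSkip l c1).foldl (removeInbetweenStep c0 c1) (true, acc)).2 := by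
  induction l generalizing acc with
  | nil => simp [removeInbetweenSkip]
  | cons c rest ih =>
    by_cases h1 : String.mk [c] = c1
    · simp [removeInbetweenSkip, h1, removeInbetweenStep]
    · simp [removeInbetweenSkip, h1, removeInbetweenStep, ih]

-- Main invariant: from the good state A's fold appends exactly B's region-skip result.
theorem fold_true_eq_go (c0 c1 : String) :
    ∀ (n : ℕ) (l : List Char), l.length ≤ n → ∀ (acc : List Char),
      (l.foldl (removeInbetweenStep c0 c1) (true, acc)).2 = acc ++ removeInbetweenGo l c0 c1 := by
  intro n
  induction n with
  | zero =>
    intro l hl acc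
    have : l = [] := List.eq_nil_of_length_eq_zero (Nat.le_zero.mp hl)
    simp [this, removeInbetweenGo]
  | succ n ih =>
    intro l hl acc
    cases l with
    | nil => simp [removeInbetweenGo]
    | cons c rest =>
      have hrest : rest.length ≤ n := Nat.lt_succ_iff.mp (by simpa using hl)
      rw [removeInbetweenGo]
      simp only [List.foldl_cons, removeInbetweenStep]
      by_cases h0 : String.mk [c] = c0
      · -- the character opens a region: A enters the bad state without appending
        simp only [if_pos h0, removeInbetweenSkip, Bool.false_eq_true, if_false]
        by_cases h1 : String.mk [c] = c1
        · -- c0 = c1 on this character: just drop it and stay good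
          simp only [if_pos h1]
          exact ih rest hrest acc
        · -- scan for the closing c1, then continue in the good state
          simp only [if_neg h1]
          rw [fold_false_eq_skip]
          exact ih (removeInbetweenSkip rest c1)
            (Nat.le_trans (removeInbetweenSkip_length_le rest c1) hrest) acc
      · -- keep the character
        simp only [if_neg h0, if_true, ite_self]
        rw [ih rest hrest (acc ++ [c])]
        simp

-- ===== VERDICT (by name: the statement is the Claim_ definition above) =====
theorem remove_inbetween_spec : Claim_equal_remove_inbetween := by
  intro in_s c0 c1 _hdom
  unfold Spec_remove_inbetween remove_inbetween remove_inbetween_alt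
  show String.mk ((in_s.toList.foldl (removeInbetweenStep c0 c1) (true, [])).2) = _
  rw [fold_true_eq_go c0 c1 in_s.toList.length in_s.toList (Nat.le_refl _) []]
  rfl
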